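-- pv_equiv track=rewrite | github.com/joewilbur00/joewilbur00 | Fantasy-Football-Aid/streamlit_fantasy_ui.py | build_roster
-- ===== SOURCE A (Python) =====
-- def build_roster(drafted_players):
--     roster = {'QB': None, 'RB1': None, 'RB2': None, 'WR1': None, 'WR2': None, 'TE': None, 'FLEX': None, 'D/ST': None, 'K': None}
--     flex_pool = []
--     if not drafted_players: return roster
--     for player in drafted_players:
--         if not isinstance(player, dict): continue
--         pos = player.get('position', '')
--         if pos == 'QB' and not roster['QB']: roster['QB'] = player
--         elif pos == 'RB':
--             if not roster['RB1']: roster['RB1'] = player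
--             elif not roster['RB2']: roster['RB2'] = player
--             else: flex_pool.append(player)
--         elif pos == 'WR':
--             if not roster['WR1']: roster['WR1'] = player
--             elif not roster['WR2']: roster['WR2'] = player
--             else: flex_pool.append(player)
--         elif pos == 'TE' and not roster['TE']: roster['TE'] = player
--         elif pos in ['D/ST', 'DST'] and not roster['D/ST']: roster['D/ST'] = player
--         elif pos == 'K' and not roster['K']: roster['K'] = player
--         else:
--             if pos in ['RB','WR','TE']: flex_pool.append(player)
--     if not roster['FLEX'] and flex_pool:
--         for p in flex_pool:
--             if p.get('position','') in ['RB','WR','TE']: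
--                 roster['FLEX'] = p
--                 break
--     return roster
-- ===== SOURCE B (Python) =====
-- def build_roster(drafted_players):
--     # Group players by (aliased) position in one pass, remembering draft order.
--     groups = {}
--     for i, player in enumerate(drafted_players or []):
--         if not isinstance(player, dict):
--             continue
--         pos = player.get('position', '')
--         key = 'D/ST' if pos == 'DST' else pos
--         groups.setdefault(key, []).append((i, player))
--
--     def slot(key, k):
--         g = groups.get(key, [])
--         return g[k][1] if k < len(g) else None
--
--     # Overflow beyond each position's quota competes for FLEX; earliest drafted wins.
--     overflow = groups.get('RB', [])[2:] + groups.get('WR', [])[2:] + groups.get('TE', [])[1:]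
--     flex = min(overflow, key=lambda e: e[0])[1] if overflow else None
--     return {'QB': slot('QB', 0), 'RB1': slot('RB', 0), 'RB2': slot('RB', 1),
--             'WR1': slot('WR', 0), 'WR2': slot('WR', 1), 'TE': slot('TE', 0),
--             'FLEX': flex, 'D/ST': slot('D/ST', 0), 'K': slot('K', 0)}
-- ===== Notes on version B (the rewrite author's own statement) =====
-- stated objective: alternative
-- what changed: Replaces A's online slot-filling state machine (a mutable 9-slot roster filled by a 9-branch if/elif chain plus a post-loop flex-pool rescan) with a staged computation: one grouping pass building position->draft-ordered entry lists (DST aliased to D/ST), each slot read off by direct indexing into its group, and FLEX chosen as the earliest-drafted entry (min by draft index) among the quota-excess slices of the RB/WR/TE groups.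
import Mathlib
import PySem

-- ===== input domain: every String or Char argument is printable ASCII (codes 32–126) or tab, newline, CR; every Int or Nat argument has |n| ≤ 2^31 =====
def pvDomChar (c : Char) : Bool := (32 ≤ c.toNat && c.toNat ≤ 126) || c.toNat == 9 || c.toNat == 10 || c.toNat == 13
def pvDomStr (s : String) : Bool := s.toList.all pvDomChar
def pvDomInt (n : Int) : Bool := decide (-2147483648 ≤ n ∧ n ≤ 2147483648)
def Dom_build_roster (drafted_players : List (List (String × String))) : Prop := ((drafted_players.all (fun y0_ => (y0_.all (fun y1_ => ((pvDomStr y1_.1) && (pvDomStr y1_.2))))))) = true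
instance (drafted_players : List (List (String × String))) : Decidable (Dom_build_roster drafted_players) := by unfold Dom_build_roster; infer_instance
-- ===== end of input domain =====

-- B replaces A's online slot-filling state machine by a staged computation: one grouping
-- pass (position → draft-ordered entries), then each slot is a direct index into its group
-- and FLEX is the earliest-drafted overflow entry (min by index over the quota-excess slices).

-- ===== PORT A =====
abbrev PVPlayer := List (String × String)
abbrev PVRoster := PySem.Dict String (Option PVPlayer)

-- Python truthiness of a roster value (None or a dict): falsy ↔ None or empty dict
def pvTruthy (o : Option PVPlayer) : Bool :=
  match o with
  | none => false
  | some d => !d.isEmpty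

-- the initial roster dict literal
def pvRoster0 : PVRoster :=
  PySem.Dict.mk [("QB", none), ("RB1", none), ("RB2", none), ("WR1", none), ("WR2", none),
                 ("TE", none), ("FLEX", none), ("D/ST", none), ("K", none)]

-- the body of A's `for player in drafted_players` loop (the isinstance(dict) guard is
-- vacuous under the type convention: every element IS a dict / assoc list)
def pvStepA (r : PVRoster) (flex : List PVPlayer) (player : PVPlayer) : PVRoster × List PVPlayer :=
  let pos := (PySem.Dict.mk player).getD "position" ""
  if pos == "QB" && !pvTruthy (r.getD "QB" none) then (r.insert "QB" (some player), flex)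
  else if pos == "RB" then
    if !pvTruthy (r.getD "RB1" none) then (r.insert "RB1" (some player), flex)
    else if !pvTruthy (r.getD "RB2" none) then (r.insert "RB2" (some player), flex)
    else (r, flex ++ [player])
  else if pos == "WR" then
    if !pvTruthy (r.getD "WR1" none) then (r.insert "WR1" (some player), flex)
    else if !pvTruthy (r.getD "WR2" none) then (r.insert "WR2" (some player), flex)
    else (r, flex ++ [player])
  else if pos == "TE" && !pvTruthy (r.getD "TE" none) then (r.insert "TE" (some player), flex)
  else if (pos == "D/ST" || pos == "DST") && !pvTruthy (r.getD "D/ST" none) then (r.insert "D/ST" (some player), flex)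
  else if pos == "K" && !pvTruthy (r.getD "K" none) then (r.insert "K" (some player), flex)
  else if (["RB", "WR", "TE"] : List String).contains pos then (r, flex ++ [player])
  else (r, flex)

-- A's post-loop `for p in flex_pool: if p.get('position','') in [...]: roster['FLEX'] = p; break`
def pvFlexScanA (r : PVRoster) : List PVPlayer → PVRoster
  | [] => r
  | p :: rest =>
      if (["RB", "WR", "TE"] : List String).contains ((PySem.Dict.mk p).getD "position" "") then
        r.insert "FLEX" (some p)
      else pvFlexScanA r rest

def build_roster (drafted_players : List (List (String × String))) : List (String × Option (List (String × String))) :=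
  if drafted_players = [] then pvRoster0.items
  else
    let st := drafted_players.foldl (fun st player => pvStepA st.1 st.2 player) (pvRoster0, [])
    (if !pvTruthy (st.1.getD "FLEX" none) && !st.2.isEmpty then pvFlexScanA st.1 st.2 else st.1).items

-- ===== PORT B =====
abbrev PVEntry := Int × PVPlayer

-- `'D/ST' if pos == 'DST' else pos`
def pvKeyOf (player : PVPlayer) : String :=
  let pos := (PySem.Dict.mk player).getD "position" ""
  if pos == "DST" then "D/ST" else pos

-- `groups.setdefault(key, []).append((i, player))` over `enumerate(drafted_players)`
def pvGroups (dp : List PVPlayer) : PySem.Dict String (List PVEntry) :=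
  (PySem.List.enumerate dp).foldl
    (fun g e => g.modify (pvKeyOf e.2) [] (fun l => l ++ [e])) (PySem.Dict.mk [])

-- `g[k][1] if k < len(g) else None` (k a literal nonnegative index, so plain getElem? is exact)
def pvSlotB (g : PySem.Dict String (List PVEntry)) (key : String) (k : Nat) : Option PVPlayer :=
  ((g.getD key [])[k]?).map (·.2)

-- `min(overflow, key=lambda e: e[0])[1] if overflow else None`
def pvFlexB : List PVEntry → Option PVPlayer
  | [] => none
  | e :: rest => some ((PySem.List.minD (e :: rest) (fun x => x.1) e).2)

def build_roster_alt (drafted_players : List (List (String × String))) : List (String × Option (List (String × String))) :=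
  let g := pvGroups drafted_players
  let ov := PySem.List.slice (g.getD "RB" []) (some 2) ++ PySem.List.slice (g.getD "WR" []) (some 2)
            ++ PySem.List.slice (g.getD "TE" []) (some 1)
  -- the returned dict literal has nine distinct keys, so as an assoc list it is exactly:
  [("QB", pvSlotB g "QB" 0), ("RB1", pvSlotB g "RB" 0), ("RB2", pvSlotB g "RB" 1),
   ("WR1", pvSlotB g "WR" 0), ("WR2", pvSlotB g "WR" 1), ("TE", pvSlotB g "TE" 0),
   ("FLEX", pvFlexB ov), ("D/ST", pvSlotB g "D/ST" 0), ("K", pvSlotB g "K" 0)]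

-- ===== PRECONDITION & SPEC =====
def Spec_build_roster (drafted_players : List (List (String × String))) (out : List (String × Option (List (String × String)))) : Prop := out = build_roster_alt drafted_players
instance (drafted_players : List (List (String × String))) (out : List (String × Option (List (String × String)))) : Decidable (Spec_build_roster drafted_players out) := by unfold Spec_build_roster; infer_instance

-- ===== CLAIM (what is proved, stated in full; the proofs are below) =====
def Claim_equal_build_roster : Prop := ∀ (drafted_players : List (List (String × String))), Dom_build_roster drafted_players → Spec_build_roster drafted_players (build_roster drafted_players)

-- ===== LEMMAS AND PROOFS =====

-- the position string of a player (A's and B's `player.get('position', '')`)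
def pvPos (p : PVPlayer) : String := (PySem.Dict.mk p).getD "position" ""

lemma pvKeyOf_eq (p : PVPlayer) : pvKeyOf p = if pvPos p == "DST" then "D/ST" else pvPos p := rfl

-- the position-`key` group of the enumerated draft list
def pvGE (key : String) (dp : List PVPlayer) : List PVEntry :=
  (PySem.List.enumerate dp).filter (fun e => pvKeyOf e.2 == key)

-- A's loop body lifted to indexed pool entries (proof-side mirror of pvStepA)
def pvStepE (r : PVRoster) (flex : List PVEntry) (e : PVEntry) : PVRoster × List PVEntry :=
  let pos := pvPos e.2
  if pos == "QB" && !pvTruthy (r.getD "QB" none) then (r.insert "QB" (some e.2), flex)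
  else if pos == "RB" then
    if !pvTruthy (r.getD "RB1" none) then (r.insert "RB1" (some e.2), flex)
    else if !pvTruthy (r.getD "RB2" none) then (r.insert "RB2" (some e.2), flex)
    else (r, flex ++ [e])
  else if pos == "WR" then
    if !pvTruthy (r.getD "WR1" none) then (r.insert "WR1" (some e.2), flex)
    else if !pvTruthy (r.getD "WR2" none) then (r.insert "WR2" (some e.2), flex)
    else (r, flex ++ [e])
  else if pos == "TE" && !pvTruthy (r.getD "TE" none) then (r.insert "TE" (some e.2), flex)
  else if (pos == "D/ST" || pos == "DST") && !pvTruthy (r.getD "D/ST" none) then (r.insert "D/ST" (some e.2), flex)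
  else if pos == "K" && !pvTruthy (r.getD "K" none) then (r.insert "K" (some e.2), flex)
  else if (["RB", "WR", "TE"] : List String).contains pos then (r, flex ++ [e])
  else (r, flex)

-- the indexed A-state
def pvFE (dp : List PVPlayer) : PVRoster × List PVEntry :=
  (PySem.List.enumerate dp).foldl (fun st e => pvStepE st.1 st.2 e) (pvRoster0, [])

-- a nine-slot roster literal
def pvMk (a b c d e f g h i : Option PVPlayer) : PVRoster :=
  PySem.Dict.mk [("QB", a), ("RB1", b), ("RB2", c), ("WR1", d), ("WR2", e),
                 ("TE", f), ("FLEX", g), ("D/ST", h), ("K", i)]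

-- the roster A's loop has built, expressed through the groups
def pvRofE (dp : List PVPlayer) : PVRoster :=
  pvMk (((pvGE "QB" dp)[0]?).map (·.2)) (((pvGE "RB" dp)[0]?).map (·.2))
       (((pvGE "RB" dp)[1]?).map (·.2)) (((pvGE "WR" dp)[0]?).map (·.2))
       (((pvGE "WR" dp)[1]?).map (·.2)) (((pvGE "TE" dp)[0]?).map (·.2))
       none (((pvGE "D/ST" dp)[0]?).map (·.2)) (((pvGE "K" dp)[0]?).map (·.2))

lemma pvMk_getD_QB (a b c d e f g h i : Option PVPlayer) : (pvMk a b c d e f g h i).getD "QB" none = a := rfl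
lemma pvMk_getD_RB1 (a b c d e f g h i : Option PVPlayer) : (pvMk a b c d e f g h i).getD "RB1" none = b := rfl
lemma pvMk_getD_RB2 (a b c d e f g h i : Option PVPlayer) : (pvMk a b c d e f g h i).getD "RB2" none = c := rfl
lemma pvMk_getD_WR1 (a b c d e f g h i : Option PVPlayer) : (pvMk a b c d e f g h i).getD "WR1" none = d := rfl
lemma pvMk_getD_WR2 (a b c d e f g h i : Option PVPlayer) : (pvMk a b c d e f g h i).getD "WR2" none = e := rfl
lemma pvMk_getD_TE (a b c d e f g h i : Option PVPlayer) : (pvMk a b c d e f g h i).getD "TE" none = f := rfl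
lemma pvMk_getD_FLEX (a b c d e f g h i : Option PVPlayer) : (pvMk a b c d e f g h i).getD "FLEX" none = g := rfl
lemma pvMk_getD_DST (a b c d e f g h i : Option PVPlayer) : (pvMk a b c d e f g h i).getD "D/ST" none = h := rfl
lemma pvMk_getD_K (a b c d e f g h i : Option PVPlayer) : (pvMk a b c d e f g h i).getD "K" none = i := rfl

lemma pvMk_ins_QB (a b c d e f g h i v : Option PVPlayer) : (pvMk a b c d e f g h i).insert "QB" v = pvMk v b c d e f g h i := rfl
lemma pvMk_ins_RB1 (a b c d e f g h i v : Option PVPlayer) : (pvMk a b c d e f g h i).insert "RB1" v = pvMk a v c d e f g h i := rfl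
lemma pvMk_ins_RB2 (a b c d e f g h i v : Option PVPlayer) : (pvMk a b c d e f g h i).insert "RB2" v = pvMk a b v d e f g h i := rfl
lemma pvMk_ins_WR1 (a b c d e f g h i v : Option PVPlayer) : (pvMk a b c d e f g h i).insert "WR1" v = pvMk a b c v e f g h i := rfl
lemma pvMk_ins_WR2 (a b c d e f g h i v : Option PVPlayer) : (pvMk a b c d e f g h i).insert "WR2" v = pvMk a b c d v f g h i := rfl
lemma pvMk_ins_TE (a b c d e f g h i v : Option PVPlayer) : (pvMk a b c d e f g h i).insert "TE" v = pvMk a b c d e v g h i := rfl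
lemma pvMk_ins_FLEX (a b c d e f g h i v : Option PVPlayer) : (pvMk a b c d e f g h i).insert "FLEX" v = pvMk a b c d e f v h i := rfl
lemma pvMk_ins_DST (a b c d e f g h i v : Option PVPlayer) : (pvMk a b c d e f g h i).insert "D/ST" v = pvMk a b c d e f g v i := rfl
lemma pvMk_ins_K (a b c d e f g h i v : Option PVPlayer) : (pvMk a b c d e f g h i).insert "K" v = pvMk a b c d e f g h v := rfl

lemma pvEnumerate_append (l : List PVPlayer) (a : PVPlayer) :
    ∀ s : Int, PySem.List.enumerate (l ++ [a]) s = PySem.List.enumerate l s ++ [(s + l.length, a)] := by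
  induction l with
  | nil => intro s; simp [PySem.List.enumerate]
  | cons x t ih =>
      intro s
      simp only [List.cons_append, PySem.List.enumerate, ih (s + 1), List.length_cons]
      have : s + 1 + (t.length : Int) = s + ((t.length + 1 : Nat) : Int) := by push_cast; ring
      rw [this]

lemma pvGE_append (key : String) (dp : List PVPlayer) (p : PVPlayer) :
    pvGE key (dp ++ [p]) =
      pvGE key dp ++ (if pvKeyOf p == key then [((dp.length : Int), p)] else []) := by
  simp only [pvGE, pvEnumerate_append dp p 0, List.filter_append, zero_add]
  by_cases h : pvKeyOf p == key <;> simp [h]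

-- the group lookup that B's table produces IS pvGE
lemma pvGroups_getD (dp : List PVPlayer) (key : String) :
    (pvGroups dp).getD key [] = pvGE key dp := by
  have h : pvGroups dp =
      ((PySem.List.enumerate dp).map (fun e => (pvKeyOf e.2, e))).foldl
        (fun g pr => g.modify pr.1 [] (fun l => l ++ [pr.2])) (PySem.Dict.mk []) := by
    rw [List.foldl_map]
    rfl
  rw [h, PySem.Dict.getD_foldl_modify_append]
  simp [pvGE, List.filter_map, Function.comp_def, PySem.Dict.getD, PySem.Dict.get?]

-- group members carry their key
lemma pvGE_key {key : String} {dp : List PVPlayer} {e : PVEntry} (he : e ∈ pvGE key dp) :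
    pvKeyOf e.2 = key := by
  have := List.of_mem_filter he
  simpa using this

-- a player with a nonempty key is a nonempty dict, hence truthy
lemma pvTruthy_slot (key : String) (hkey : key ≠ "") (dp : List PVPlayer) (k : Nat) :
    pvTruthy (((pvGE key dp)[k]?).map (·.2)) = decide (k < (pvGE key dp).length) := by
  cases h : (pvGE key dp)[k]? with
  | none =>
      have := List.getElem?_eq_none_iff.mp h
      have hnlt : ¬ (k < (pvGE key dp).length) := by omega
      simp [pvTruthy, hnlt]
  | some e =>
      have hmem : e ∈ pvGE key dp := List.mem_of_getElem? h
      have hk : pvKeyOf e.2 = key := pvGE_key hmem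
      have hne : e.2 ≠ [] := by
        intro hnil
        apply hkey
        rw [← hk, hnil]
        rfl
      have hlt : k < (pvGE key dp).length := (List.getElem?_eq_some_iff.mp h).1
      simp only [Option.map_some, pvTruthy]
      simp [hne, hlt]

-- the big invariant of A's loop, phrased over the indexed mirror
def pvInv (dp : List PVPlayer) : Prop :=
  (pvFE dp).1 = pvRofE dp ∧
  (pvFE dp).2.filter (fun e => pvKeyOf e.2 == "RB") = (pvGE "RB" dp).drop 2 ∧
  (pvFE dp).2.filter (fun e => pvKeyOf e.2 == "WR") = (pvGE "WR" dp).drop 2 ∧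
  (pvFE dp).2.filter (fun e => pvKeyOf e.2 == "TE") = (pvGE "TE" dp).drop 1 ∧
  (∀ e ∈ (pvFE dp).2, pvKeyOf e.2 = "RB" ∨ pvKeyOf e.2 = "WR" ∨ pvKeyOf e.2 = "TE") ∧
  (pvFE dp).2.Pairwise (fun a b => a.1 < b.1) ∧
  (∀ e ∈ (pvFE dp).2, e.1 < (dp.length : Int))

lemma pvFE_append (dp : List PVPlayer) (p : PVPlayer) :
    pvFE (dp ++ [p]) = pvStepE (pvFE dp).1 (pvFE dp).2 ((dp.length : Int), p) := by
  simp [pvFE, pvEnumerate_append dp p 0, List.foldl_append]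

lemma pvInv_holds : ∀ dp : List PVPlayer, pvInv dp := by
  intro dp
  induction dp using List.reverseRecOn with
  | nil => exact ⟨rfl, rfl, rfl, rfl, by simp [pvFE, PySem.List.enumerate], by simp [pvFE, PySem.List.enumerate], by simp [pvFE, PySem.List.enumerate]⟩
  | append_singleton dp p ih =>
      obtain ⟨h1, hRB, hWR, hTE, hcov, hmono, hbnd⟩ := ih
      have hbnd' : ∀ e ∈ (pvFE dp).2, e.1 < ((dp ++ [p]).length : Int) := by
        intro e he
        have := hbnd e he
        simp only [List.length_append, List.length_cons, List.length_nil]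
        push_cast
        omega
      have hmono' : ((pvFE dp).2 ++ [((dp.length : Int), p)]).Pairwise (fun a b => a.1 < b.1) := by
        rw [List.pairwise_append]
        exact ⟨hmono, List.pairwise_singleton _ _, fun a ha b hb => by
          rw [List.mem_singleton] at hb
          subst hb
          exact hbnd a ha⟩
      have hbnd2 : ∀ e ∈ (pvFE dp).2 ++ [((dp.length : Int), p)], e.1 < ((dp ++ [p]).length : Int) := by
        intro e he
        simp only [List.length_append, List.length_cons, List.length_nil]
        rcases List.mem_append.mp he with h | h
        · have := hbnd e h
          push_cast
          omega
        · rw [List.mem_singleton] at h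
          subst h
          push_cast
          omega
      by_cases hQ : pvPos p = "QB"
      · have hk : pvKeyOf p = "QB" := by rw [pvKeyOf_eq, hQ]; rfl
        have hGEq := pvGE_append "QB" dp p
        rw [hk] at hGEq
        simp only [show (("QB" : String) == "QB") = true from rfl, if_true] at hGEq
        have hGEr : pvGE "RB" (dp ++ [p]) = pvGE "RB" dp := by rw [pvGE_append, hk]; simp
        have hGEw : pvGE "WR" (dp ++ [p]) = pvGE "WR" dp := by rw [pvGE_append, hk]; simp
        have hGEt : pvGE "TE" (dp ++ [p]) = pvGE "TE" dp := by rw [pvGE_append, hk]; simp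
        have hGEd : pvGE "D/ST" (dp ++ [p]) = pvGE "D/ST" dp := by rw [pvGE_append, hk]; simp
        have hGEk : pvGE "K" (dp ++ [p]) = pvGE "K" dp := by rw [pvGE_append, hk]; simp
        rcases Nat.eq_zero_or_pos (pvGE "QB" dp).length with hlen | hpos1
        · have hnil : pvGE "QB" dp = [] := List.length_eq_zero_iff.mp hlen
          have hT1 : pvTruthy ((pvRofE dp).getD "QB" none) = false := by
            simp only [pvRofE, pvMk_getD_QB]
            rw [pvTruthy_slot "QB" (by decide)]
            simp [hlen]
          have hnew : pvFE (dp ++ [p]) = ((pvRofE dp).insert "QB" (some p), (pvFE dp).2) := by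
            rw [pvFE_append, h1]
            unfold pvStepE
            simp [hQ, hT1]
          refine ⟨?_, ?_, ?_, ?_, ?_, ?_, ?_⟩ <;> rw [hnew] <;> dsimp only
          · simp only [pvRofE, pvMk_ins_QB, hGEq, hGEr, hGEw, hGEt, hGEd, hGEk, hnil, List.nil_append]
            rfl
          · rw [hRB, hGEr]
          · rw [hWR, hGEw]
          · rw [hTE, hGEt]
          · exact hcov
          · exact hmono
          · exact hbnd'
        · have hT1 : pvTruthy ((pvRofE dp).getD "QB" none) = true := by
            simp only [pvRofE, pvMk_getD_QB]
            rw [pvTruthy_slot "QB" (by decide)]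
            simp [hpos1]
          have hnew : pvFE (dp ++ [p]) = (pvRofE dp, (pvFE dp).2) := by
            rw [pvFE_append, h1]
            unfold pvStepE
            simp [hQ, hT1]
          refine ⟨?_, ?_, ?_, ?_, ?_, ?_, ?_⟩ <;> rw [hnew] <;> dsimp only
          · simp only [pvRofE, hGEq, hGEr, hGEw, hGEt, hGEd, hGEk]
            rw [List.getElem?_append_left hpos1]
          · rw [hRB, hGEr]
          · rw [hWR, hGEw]
          · rw [hTE, hGEt]
          · exact hcov
          · exact hmono
          · exact hbnd'
      by_cases hR : pvPos p = "RB"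
      · have hk : pvKeyOf p = "RB" := by rw [pvKeyOf_eq, hR]; rfl
        have hGEr := pvGE_append "RB" dp p
        rw [hk] at hGEr
        simp only [show (("RB" : String) == "RB") = true from rfl, if_true] at hGEr
        have hGEq : pvGE "QB" (dp ++ [p]) = pvGE "QB" dp := by rw [pvGE_append, hk]; simp
        have hGEw : pvGE "WR" (dp ++ [p]) = pvGE "WR" dp := by rw [pvGE_append, hk]; simp
        have hGEt : pvGE "TE" (dp ++ [p]) = pvGE "TE" dp := by rw [pvGE_append, hk]; simp
        have hGEd : pvGE "D/ST" (dp ++ [p]) = pvGE "D/ST" dp := by rw [pvGE_append, hk]; simp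
        have hGEk : pvGE "K" (dp ++ [p]) = pvGE "K" dp := by rw [pvGE_append, hk]; simp
        rcases Nat.eq_zero_or_pos (pvGE "RB" dp).length with hlen | hpos1
        · have hnil : pvGE "RB" dp = [] := List.length_eq_zero_iff.mp hlen
          have hT1 : pvTruthy ((pvRofE dp).getD "RB1" none) = false := by
            simp only [pvRofE, pvMk_getD_RB1]
            rw [pvTruthy_slot "RB" (by decide)]
            simp [hlen]
          have hnew : pvFE (dp ++ [p]) = ((pvRofE dp).insert "RB1" (some p), (pvFE dp).2) := by
            rw [pvFE_append, h1]
            unfold pvStepE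
            simp [hR, hT1]
          refine ⟨?_, ?_, ?_, ?_, ?_, ?_, ?_⟩ <;> rw [hnew] <;> dsimp only
          · simp only [pvRofE, pvMk_ins_RB1, hGEr, hGEq, hGEw, hGEt, hGEd, hGEk, hnil, List.nil_append]
            rfl
          · rw [hRB, hGEr, hnil]
            simp
          · rw [hWR, hGEw]
          · rw [hTE, hGEt]
          · exact hcov
          · exact hmono
          · exact hbnd'
        · rcases Nat.lt_or_ge 1 (pvGE "RB" dp).length with hpos2 | hle1
          · have hT1 : pvTruthy ((pvRofE dp).getD "RB1" none) = true := by
              simp only [pvRofE, pvMk_getD_RB1]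
              rw [pvTruthy_slot "RB" (by decide)]
              simp [hpos1]
            have hT2 : pvTruthy ((pvRofE dp).getD "RB2" none) = true := by
              simp only [pvRofE, pvMk_getD_RB2]
              rw [pvTruthy_slot "RB" (by decide)]
              simp [hpos2]
            have hnew : pvFE (dp ++ [p]) =
                (pvRofE dp, (pvFE dp).2 ++ [((dp.length : Int), p)]) := by
              rw [pvFE_append, h1]
              unfold pvStepE
              simp [hR, hT1, hT2]
            refine ⟨?_, ?_, ?_, ?_, ?_, ?_, ?_⟩ <;> rw [hnew] <;> dsimp only
            · simp only [pvRofE, hGEr, hGEq, hGEw, hGEt, hGEd, hGEk]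
              rw [List.getElem?_append_left hpos1, List.getElem?_append_left hpos2]
            · rw [List.filter_append, hRB, hGEr, List.drop_append_of_le_length (by omega : 2 <= (pvGE "RB" dp).length)]
              simp [hk]
            · rw [List.filter_append, hWR, hGEw]
              simp [hk]
            · rw [List.filter_append, hTE, hGEt]
              simp [hk]
            · intro e he
              rcases List.mem_append.mp he with h | h
              · exact hcov e h
              · rw [List.mem_singleton] at h
                subst h
                simp [hk]
            · exact hmono'
            · exact hbnd2
          · have hlen1 : (pvGE "RB" dp).length = 1 := by omega
            have hsnd : (pvGE "RB" dp ++ [((dp.length : Int), p)])[1]? = some ((dp.length : Int), p) := by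
              rw [List.getElem?_append_right (by omega : (pvGE "RB" dp).length ≤ 1)]
              simp [hlen1]
            have hT1 : pvTruthy ((pvRofE dp).getD "RB1" none) = true := by
              simp only [pvRofE, pvMk_getD_RB1]
              rw [pvTruthy_slot "RB" (by decide)]
              simp [hpos1]
            have hT2 : pvTruthy ((pvRofE dp).getD "RB2" none) = false := by
              simp only [pvRofE, pvMk_getD_RB2]
              rw [pvTruthy_slot "RB" (by decide)]
              simp [hlen1]
            have hnew : pvFE (dp ++ [p]) = ((pvRofE dp).insert "RB2" (some p), (pvFE dp).2) := by
              rw [pvFE_append, h1]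
              unfold pvStepE
              simp [hR, hT1, hT2]
            refine ⟨?_, ?_, ?_, ?_, ?_, ?_, ?_⟩ <;> rw [hnew] <;> dsimp only
            · simp only [pvRofE, pvMk_ins_RB2, hGEr, hGEq, hGEw, hGEt, hGEd, hGEk,
                List.getElem?_append_left hpos1, hsnd, Option.map_some]
            · rw [hRB, hGEr]
              rw [List.drop_eq_nil_of_le (by simp [hlen1]), List.drop_eq_nil_of_le (by simp [hlen1])]
            · rw [hWR, hGEw]
            · rw [hTE, hGEt]
            · exact hcov
            · exact hmono
            · exact hbnd'
      by_cases hW : pvPos p = "WR"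
      · have hk : pvKeyOf p = "WR" := by rw [pvKeyOf_eq, hW]; rfl
        have hGEw := pvGE_append "WR" dp p
        rw [hk] at hGEw
        simp only [show (("WR" : String) == "WR") = true from rfl, if_true] at hGEw
        have hGEq : pvGE "QB" (dp ++ [p]) = pvGE "QB" dp := by rw [pvGE_append, hk]; simp
        have hGEr : pvGE "RB" (dp ++ [p]) = pvGE "RB" dp := by rw [pvGE_append, hk]; simp
        have hGEt : pvGE "TE" (dp ++ [p]) = pvGE "TE" dp := by rw [pvGE_append, hk]; simp
        have hGEd : pvGE "D/ST" (dp ++ [p]) = pvGE "D/ST" dp := by rw [pvGE_append, hk]; simp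
        have hGEk : pvGE "K" (dp ++ [p]) = pvGE "K" dp := by rw [pvGE_append, hk]; simp
        rcases Nat.eq_zero_or_pos (pvGE "WR" dp).length with hlen | hpos1
        · have hnil : pvGE "WR" dp = [] := List.length_eq_zero_iff.mp hlen
          have hT1 : pvTruthy ((pvRofE dp).getD "WR1" none) = false := by
            simp only [pvRofE, pvMk_getD_WR1]
            rw [pvTruthy_slot "WR" (by decide)]
            simp [hlen]
          have hnew : pvFE (dp ++ [p]) = ((pvRofE dp).insert "WR1" (some p), (pvFE dp).2) := by
            rw [pvFE_append, h1]
            unfold pvStepE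
            simp [hW, hT1]
          refine ⟨?_, ?_, ?_, ?_, ?_, ?_, ?_⟩ <;> rw [hnew] <;> dsimp only
          · simp only [pvRofE, pvMk_ins_WR1, hGEw, hGEq, hGEr, hGEt, hGEd, hGEk, hnil, List.nil_append]
            rfl
          · rw [hRB, hGEr]
          · rw [hWR, hGEw, hnil]
            simp
          · rw [hTE, hGEt]
          · exact hcov
          · exact hmono
          · exact hbnd'
        · rcases Nat.lt_or_ge 1 (pvGE "WR" dp).length with hpos2 | hle1
          · have hT1 : pvTruthy ((pvRofE dp).getD "WR1" none) = true := by
              simp only [pvRofE, pvMk_getD_WR1]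
              rw [pvTruthy_slot "WR" (by decide)]
              simp [hpos1]
            have hT2 : pvTruthy ((pvRofE dp).getD "WR2" none) = true := by
              simp only [pvRofE, pvMk_getD_WR2]
              rw [pvTruthy_slot "WR" (by decide)]
              simp [hpos2]
            have hnew : pvFE (dp ++ [p]) =
                (pvRofE dp, (pvFE dp).2 ++ [((dp.length : Int), p)]) := by
              rw [pvFE_append, h1]
              unfold pvStepE
              simp [hW, hT1, hT2]
            refine ⟨?_, ?_, ?_, ?_, ?_, ?_, ?_⟩ <;> rw [hnew] <;> dsimp only
            · simp only [pvRofE, hGEw, hGEq, hGEr, hGEt, hGEd, hGEk]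
              rw [List.getElem?_append_left hpos1, List.getElem?_append_left hpos2]
            · rw [List.filter_append, hRB, hGEr]
              simp [hk]
            · rw [List.filter_append, hWR, hGEw, List.drop_append_of_le_length (by omega : 2 <= (pvGE "WR" dp).length)]
              simp [hk]
            · rw [List.filter_append, hTE, hGEt]
              simp [hk]
            · intro e he
              rcases List.mem_append.mp he with h | h
              · exact hcov e h
              · rw [List.mem_singleton] at h
                subst h
                simp [hk]
            · exact hmono'
            · exact hbnd2
          · have hlen1 : (pvGE "WR" dp).length = 1 := by omega
            have hsnd : (pvGE "WR" dp ++ [((dp.length : Int), p)])[1]? = some ((dp.length : Int), p) := by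
              rw [List.getElem?_append_right (by omega : (pvGE "WR" dp).length ≤ 1)]
              simp [hlen1]
            have hT1 : pvTruthy ((pvRofE dp).getD "WR1" none) = true := by
              simp only [pvRofE, pvMk_getD_WR1]
              rw [pvTruthy_slot "WR" (by decide)]
              simp [hpos1]
            have hT2 : pvTruthy ((pvRofE dp).getD "WR2" none) = false := by
              simp only [pvRofE, pvMk_getD_WR2]
              rw [pvTruthy_slot "WR" (by decide)]
              simp [hlen1]
            have hnew : pvFE (dp ++ [p]) = ((pvRofE dp).insert "WR2" (some p), (pvFE dp).2) := by
              rw [pvFE_append, h1]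
              unfold pvStepE
              simp [hW, hT1, hT2]
            refine ⟨?_, ?_, ?_, ?_, ?_, ?_, ?_⟩ <;> rw [hnew] <;> dsimp only
            · simp only [pvRofE, pvMk_ins_WR2, hGEw, hGEq, hGEr, hGEt, hGEd, hGEk,
                List.getElem?_append_left hpos1, hsnd, Option.map_some]
            · rw [hRB, hGEr]
            · rw [hWR, hGEw]
              rw [List.drop_eq_nil_of_le (by simp [hlen1]), List.drop_eq_nil_of_le (by simp [hlen1])]
            · rw [hTE, hGEt]
            · exact hcov
            · exact hmono
            · exact hbnd'
      by_cases hT : pvPos p = "TE"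
      · have hk : pvKeyOf p = "TE" := by rw [pvKeyOf_eq, hT]; rfl
        have hGEt := pvGE_append "TE" dp p
        rw [hk] at hGEt
        simp only [show (("TE" : String) == "TE") = true from rfl, if_true] at hGEt
        have hGEq : pvGE "QB" (dp ++ [p]) = pvGE "QB" dp := by rw [pvGE_append, hk]; simp
        have hGEr : pvGE "RB" (dp ++ [p]) = pvGE "RB" dp := by rw [pvGE_append, hk]; simp
        have hGEw : pvGE "WR" (dp ++ [p]) = pvGE "WR" dp := by rw [pvGE_append, hk]; simp
        have hGEd : pvGE "D/ST" (dp ++ [p]) = pvGE "D/ST" dp := by rw [pvGE_append, hk]; simp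
        have hGEk : pvGE "K" (dp ++ [p]) = pvGE "K" dp := by rw [pvGE_append, hk]; simp
        rcases Nat.eq_zero_or_pos (pvGE "TE" dp).length with hlen | hpos1
        · have hnil : pvGE "TE" dp = [] := List.length_eq_zero_iff.mp hlen
          have hT1 : pvTruthy ((pvRofE dp).getD "TE" none) = false := by
            simp only [pvRofE, pvMk_getD_TE]
            rw [pvTruthy_slot "TE" (by decide)]
            simp [hlen]
          have hnew : pvFE (dp ++ [p]) = ((pvRofE dp).insert "TE" (some p), (pvFE dp).2) := by
            rw [pvFE_append, h1]
            unfold pvStepE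
            simp [hT, hT1]
          refine ⟨?_, ?_, ?_, ?_, ?_, ?_, ?_⟩ <;> rw [hnew] <;> dsimp only
          · simp only [pvRofE, pvMk_ins_TE, hGEt, hGEq, hGEr, hGEw, hGEd, hGEk, hnil, List.nil_append]
            rfl
          · rw [hRB, hGEr]
          · rw [hWR, hGEw]
          · rw [hTE, hGEt, hnil]
            simp
          · exact hcov
          · exact hmono
          · exact hbnd'
        · have hT1 : pvTruthy ((pvRofE dp).getD "TE" none) = true := by
            simp only [pvRofE, pvMk_getD_TE]
            rw [pvTruthy_slot "TE" (by decide)]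
            simp [hpos1]
          have hnew : pvFE (dp ++ [p]) =
              (pvRofE dp, (pvFE dp).2 ++ [((dp.length : Int), p)]) := by
            rw [pvFE_append, h1]
            unfold pvStepE
            simp [hT, hT1]
          refine ⟨?_, ?_, ?_, ?_, ?_, ?_, ?_⟩ <;> rw [hnew] <;> dsimp only
          · simp only [pvRofE, hGEt, hGEq, hGEr, hGEw, hGEd, hGEk]
            rw [List.getElem?_append_left hpos1]
          · rw [List.filter_append, hRB, hGEr]
            simp [hk]
          · rw [List.filter_append, hWR, hGEw]
            simp [hk]
          · rw [List.filter_append, hTE, hGEt, List.drop_append_of_le_length (by omega : 1 <= (pvGE "TE" dp).length)]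
            simp [hk]
          · intro e he
            rcases List.mem_append.mp he with h | h
            · exact hcov e h
            · rw [List.mem_singleton] at h
              subst h
              simp [hk]
          · exact hmono'
          · exact hbnd2
      by_cases hD : pvPos p = "D/ST"
      · have hk : pvKeyOf p = "D/ST" := by rw [pvKeyOf_eq, hD]; rfl
        have hGEd := pvGE_append "D/ST" dp p
        rw [hk] at hGEd
        simp only [show (("D/ST" : String) == "D/ST") = true from rfl, if_true] at hGEd
        have hGEq : pvGE "QB" (dp ++ [p]) = pvGE "QB" dp := by rw [pvGE_append, hk]; simp
        have hGEr : pvGE "RB" (dp ++ [p]) = pvGE "RB" dp := by rw [pvGE_append, hk]; simp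
        have hGEw : pvGE "WR" (dp ++ [p]) = pvGE "WR" dp := by rw [pvGE_append, hk]; simp
        have hGEt : pvGE "TE" (dp ++ [p]) = pvGE "TE" dp := by rw [pvGE_append, hk]; simp
        have hGEk : pvGE "K" (dp ++ [p]) = pvGE "K" dp := by rw [pvGE_append, hk]; simp
        rcases Nat.eq_zero_or_pos (pvGE "D/ST" dp).length with hlen | hpos1
        · have hnil : pvGE "D/ST" dp = [] := List.length_eq_zero_iff.mp hlen
          have hT1 : pvTruthy ((pvRofE dp).getD "D/ST" none) = false := by
            simp only [pvRofE, pvMk_getD_DST]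
            rw [pvTruthy_slot "D/ST" (by decide)]
            simp [hlen]
          have hnew : pvFE (dp ++ [p]) = ((pvRofE dp).insert "D/ST" (some p), (pvFE dp).2) := by
            rw [pvFE_append, h1]
            unfold pvStepE
            simp [hD, hT1]
          refine ⟨?_, ?_, ?_, ?_, ?_, ?_, ?_⟩ <;> rw [hnew] <;> dsimp only
          · simp only [pvRofE, pvMk_ins_DST, hGEd, hGEq, hGEr, hGEw, hGEt, hGEk, hnil, List.nil_append]
            rfl
          · rw [hRB, hGEr]
          · rw [hWR, hGEw]
          · rw [hTE, hGEt]
          · exact hcov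
          · exact hmono
          · exact hbnd'
        · have hT1 : pvTruthy ((pvRofE dp).getD "D/ST" none) = true := by
            simp only [pvRofE, pvMk_getD_DST]
            rw [pvTruthy_slot "D/ST" (by decide)]
            simp [hpos1]
          have hnew : pvFE (dp ++ [p]) = (pvRofE dp, (pvFE dp).2) := by
            rw [pvFE_append, h1]
            unfold pvStepE
            simp [hD, hT1]
          refine ⟨?_, ?_, ?_, ?_, ?_, ?_, ?_⟩ <;> rw [hnew] <;> dsimp only
          · simp only [pvRofE, hGEd, hGEq, hGEr, hGEw, hGEt, hGEk]
            rw [List.getElem?_append_left hpos1]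
          · rw [hRB, hGEr]
          · rw [hWR, hGEw]
          · rw [hTE, hGEt]
          · exact hcov
          · exact hmono
          · exact hbnd'
      by_cases hDS : pvPos p = "DST"
      · have hk : pvKeyOf p = "D/ST" := by rw [pvKeyOf_eq, hDS]; rfl
        have hGEd := pvGE_append "D/ST" dp p
        rw [hk] at hGEd
        simp only [show (("D/ST" : String) == "D/ST") = true from rfl, if_true] at hGEd
        have hGEq : pvGE "QB" (dp ++ [p]) = pvGE "QB" dp := by rw [pvGE_append, hk]; simp
        have hGEr : pvGE "RB" (dp ++ [p]) = pvGE "RB" dp := by rw [pvGE_append, hk]; simp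
        have hGEw : pvGE "WR" (dp ++ [p]) = pvGE "WR" dp := by rw [pvGE_append, hk]; simp
        have hGEt : pvGE "TE" (dp ++ [p]) = pvGE "TE" dp := by rw [pvGE_append, hk]; simp
        have hGEk : pvGE "K" (dp ++ [p]) = pvGE "K" dp := by rw [pvGE_append, hk]; simp
        rcases Nat.eq_zero_or_pos (pvGE "D/ST" dp).length with hlen | hpos1
        · have hnil : pvGE "D/ST" dp = [] := List.length_eq_zero_iff.mp hlen
          have hT1 : pvTruthy ((pvRofE dp).getD "D/ST" none) = false := by
            simp only [pvRofE, pvMk_getD_DST]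
            rw [pvTruthy_slot "D/ST" (by decide)]
            simp [hlen]
          have hnew : pvFE (dp ++ [p]) = ((pvRofE dp).insert "D/ST" (some p), (pvFE dp).2) := by
            rw [pvFE_append, h1]
            unfold pvStepE
            simp [hDS, hT1]
          refine ⟨?_, ?_, ?_, ?_, ?_, ?_, ?_⟩ <;> rw [hnew] <;> dsimp only
          · simp only [pvRofE, pvMk_ins_DST, hGEd, hGEq, hGEr, hGEw, hGEt, hGEk, hnil, List.nil_append]
            rfl
          · rw [hRB, hGEr]
          · rw [hWR, hGEw]
          · rw [hTE, hGEt]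
          · exact hcov
          · exact hmono
          · exact hbnd'
        · have hT1 : pvTruthy ((pvRofE dp).getD "D/ST" none) = true := by
            simp only [pvRofE, pvMk_getD_DST]
            rw [pvTruthy_slot "D/ST" (by decide)]
            simp [hpos1]
          have hnew : pvFE (dp ++ [p]) = (pvRofE dp, (pvFE dp).2) := by
            rw [pvFE_append, h1]
            unfold pvStepE
            simp [hDS, hT1]
          refine ⟨?_, ?_, ?_, ?_, ?_, ?_, ?_⟩ <;> rw [hnew] <;> dsimp only
          · simp only [pvRofE, hGEd, hGEq, hGEr, hGEw, hGEt, hGEk]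
            rw [List.getElem?_append_left hpos1]
          · rw [hRB, hGEr]
          · rw [hWR, hGEw]
          · rw [hTE, hGEt]
          · exact hcov
          · exact hmono
          · exact hbnd'
      by_cases hK2 : pvPos p = "K"
      · have hk : pvKeyOf p = "K" := by rw [pvKeyOf_eq, hK2]; rfl
        have hGEk := pvGE_append "K" dp p
        rw [hk] at hGEk
        simp only [show (("K" : String) == "K") = true from rfl, if_true] at hGEk
        have hGEq : pvGE "QB" (dp ++ [p]) = pvGE "QB" dp := by rw [pvGE_append, hk]; simp
        have hGEr : pvGE "RB" (dp ++ [p]) = pvGE "RB" dp := by rw [pvGE_append, hk]; simp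
        have hGEw : pvGE "WR" (dp ++ [p]) = pvGE "WR" dp := by rw [pvGE_append, hk]; simp
        have hGEt : pvGE "TE" (dp ++ [p]) = pvGE "TE" dp := by rw [pvGE_append, hk]; simp
        have hGEd : pvGE "D/ST" (dp ++ [p]) = pvGE "D/ST" dp := by rw [pvGE_append, hk]; simp
        rcases Nat.eq_zero_or_pos (pvGE "K" dp).length with hlen | hpos1
        · have hnil : pvGE "K" dp = [] := List.length_eq_zero_iff.mp hlen
          have hT1 : pvTruthy ((pvRofE dp).getD "K" none) = false := by
            simp only [pvRofE, pvMk_getD_K]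
            rw [pvTruthy_slot "K" (by decide)]
            simp [hlen]
          have hnew : pvFE (dp ++ [p]) = ((pvRofE dp).insert "K" (some p), (pvFE dp).2) := by
            rw [pvFE_append, h1]
            unfold pvStepE
            simp [hK2, hT1]
          refine ⟨?_, ?_, ?_, ?_, ?_, ?_, ?_⟩ <;> rw [hnew] <;> dsimp only
          · simp only [pvRofE, pvMk_ins_K, hGEk, hGEq, hGEr, hGEw, hGEt, hGEd, hnil, List.nil_append]
            rfl
          · rw [hRB, hGEr]
          · rw [hWR, hGEw]
          · rw [hTE, hGEt]
          · exact hcov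
          · exact hmono
          · exact hbnd'
        · have hT1 : pvTruthy ((pvRofE dp).getD "K" none) = true := by
            simp only [pvRofE, pvMk_getD_K]
            rw [pvTruthy_slot "K" (by decide)]
            simp [hpos1]
          have hnew : pvFE (dp ++ [p]) = (pvRofE dp, (pvFE dp).2) := by
            rw [pvFE_append, h1]
            unfold pvStepE
            simp [hK2, hT1]
          refine ⟨?_, ?_, ?_, ?_, ?_, ?_, ?_⟩ <;> rw [hnew] <;> dsimp only
          · simp only [pvRofE, hGEk, hGEq, hGEr, hGEw, hGEt, hGEd]
            rw [List.getElem?_append_left hpos1]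
          · rw [hRB, hGEr]
          · rw [hWR, hGEw]
          · rw [hTE, hGEt]
          · exact hcov
          · exact hmono
          · exact hbnd'
      have hkey : pvKeyOf p = pvPos p := by rw [pvKeyOf_eq]; simp [hDS]
      have hGEq : pvGE "QB" (dp ++ [p]) = pvGE "QB" dp := by rw [pvGE_append, hkey]; simp [hQ]
      have hGEr : pvGE "RB" (dp ++ [p]) = pvGE "RB" dp := by rw [pvGE_append, hkey]; simp [hR]
      have hGEw : pvGE "WR" (dp ++ [p]) = pvGE "WR" dp := by rw [pvGE_append, hkey]; simp [hW]
      have hGEt : pvGE "TE" (dp ++ [p]) = pvGE "TE" dp := by rw [pvGE_append, hkey]; simp [hT]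
      have hGEd : pvGE "D/ST" (dp ++ [p]) = pvGE "D/ST" dp := by rw [pvGE_append, hkey]; simp [hD]
      have hGEk : pvGE "K" (dp ++ [p]) = pvGE "K" dp := by rw [pvGE_append, hkey]; simp [hK2]
      have hnew : pvFE (dp ++ [p]) = (pvRofE dp, (pvFE dp).2) := by
        rw [pvFE_append, h1]
        unfold pvStepE
        simp [hQ, hR, hW, hT, hD, hDS, hK2]
      refine ⟨?_, ?_, ?_, ?_, ?_, ?_, ?_⟩ <;> rw [hnew] <;> dsimp only
      · simp only [pvRofE, hGEq, hGEr, hGEw, hGEt, hGEd, hGEk]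
      · rw [hRB, hGEr]
      · rw [hWR, hGEw]
      · rw [hTE, hGEt]
      · exact hcov
      · exact hmono
      · exact hbnd'

-- A's fold is the snd-projection of the indexed fold
lemma pvFold_proj (dp : List PVPlayer) :
    ∀ (s : Int) (r : PVRoster) (pool : List PVEntry),
      dp.foldl (fun st player => pvStepA st.1 st.2 player) (r, pool.map (·.2)) =
        (((PySem.List.enumerate dp s).foldl (fun st e => pvStepE st.1 st.2 e) (r, pool)).1,
         ((PySem.List.enumerate dp s).foldl (fun st e => pvStepE st.1 st.2 e) (r, pool)).2.map (·.2)) := by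
  induction dp with
  | nil => intro s r pool; simp [PySem.List.enumerate]
  | cons p t ih =>
      intro s r pool
      have hstep : pvStepA r (pool.map (·.2)) p =
          ((pvStepE r pool (s, p)).1, (pvStepE r pool (s, p)).2.map (·.2)) := by
        unfold pvStepA pvStepE
        simp only [pvPos]
        split_ifs <;> simp
      simp only [PySem.List.enumerate, List.foldl_cons, hstep]
      exact ih (s + 1) _ _

lemma pvMin?_isSome (xs : List PVEntry) (key : PVEntry → Int) (h : xs ≠ []) :
    (PySem.List.min? xs key).isSome := by
  cases xs with
  | nil => exact absurd rfl h
  | cons x t =>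
      unfold PySem.List.min?
      rw [List.foldl_cons]
      show (List.foldl _ (some x) t).isSome
      clear h
      induction t generalizing x with
      | nil => rfl
      | cons y t ih =>
          rw [List.foldl_cons]
          show (List.foldl _ (if key y < key x then some y else some x) t).isSome
          split_ifs with hk
          · exact ih y
          · exact ih x

-- ===== VERDICT (by name: the statement is the Claim_ definition above) =====
theorem build_roster_spec : Claim_equal_build_roster := by
  intro dp _
  show build_roster dp = build_roster_alt dp
  obtain ⟨h1, hRB, hWR, hTE, hcov, hmono, hbnd⟩ := pvInv_holds dp
  by_cases hnil : dp = []
  · subst hnil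
    rfl
  · unfold build_roster
    rw [if_neg hnil]
    have hproj := pvFold_proj dp 0 pvRoster0 []
    simp only [List.map_nil] at hproj
    rw [hproj]
    have hFE : List.foldl (fun st e => pvStepE st.1 st.2 e) (pvRoster0, []) (PySem.List.enumerate dp)
        = pvFE dp := rfl
    rw [hFE, h1]
    have hflexD : pvTruthy ((pvRofE dp).getD "FLEX" none) = false := by
      simp only [pvRofE, pvMk_getD_FLEX]
      rfl
    -- B's overflow list, and its permutation with A's flex pool
    have hWfil : (List.filter (fun e => !(pvKeyOf e.2 == "RB")) (pvFE dp).2).filter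
        (fun e => pvKeyOf e.2 == "WR") = List.filter (fun e => pvKeyOf e.2 == "WR") (pvFE dp).2 := by
      rw [List.filter_filter]
      apply List.filter_congr
      intro e _
      by_cases h : pvKeyOf e.2 = "WR" <;> simp [h]
    have hTfil : (List.filter (fun e => !(pvKeyOf e.2 == "RB")) (pvFE dp).2).filter
        (fun e => !(pvKeyOf e.2 == "WR")) = List.filter (fun e => pvKeyOf e.2 == "TE") (pvFE dp).2 := by
      rw [List.filter_filter]
      apply List.filter_congr
      intro e he
      rcases hcov e he with h | h | h <;> simp [h]
    have hperm : (pvFE dp).2.Perm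
        ((pvGE "RB" dp).drop 2 ++ (pvGE "WR" dp).drop 2 ++ (pvGE "TE" dp).drop 1) := by
      have p1 := (List.filter_append_perm (fun e => pvKeyOf e.2 == "RB") (pvFE dp).2).symm
      have p2 := (List.filter_append_perm (fun e => pvKeyOf e.2 == "WR")
        (List.filter (fun e => !(pvKeyOf e.2 == "RB")) (pvFE dp).2)).symm
      rw [hWfil, hTfil] at p2
      have p3 := p1.trans ((List.Perm.refl _).append p2)
      rw [hRB, hWR, hTE] at p3
      rw [List.append_assoc]
      exact p3
    have hs2 : ∀ l : List PVEntry, PySem.List.slice l (some 2) = l.drop 2 := by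
      intro l
      rw [PySem.List.slice_from l (by norm_num : (0:Int) ≤ 2)]
      rfl
    have hs1 : ∀ l : List PVEntry, PySem.List.slice l (some 1) = l.drop 1 := by
      intro l
      rw [PySem.List.slice_from l (by norm_num : (0:Int) ≤ 1)]
      rfl
    unfold build_roster_alt
    simp only [pvGroups_getD, hs2, hs1]
    cases hL : (pvFE dp).2 with
    | nil =>
        rw [hL] at hperm
        have hov := hperm.symm.eq_nil
        rw [hov]
        simp only [List.map_nil, List.isEmpty_nil, Bool.not_true, Bool.and_false, hflexD]
        rw [if_neg (by simp : ¬ (false = true))]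
        simp only [pvRofE, pvMk, pvSlotB, pvGroups_getD, pvFlexB]
    | cons e0 rest =>
        have he0 : e0 ∈ (pvFE dp).2 := by rw [hL]; exact List.mem_cons_self
        have hk0 := hcov e0 he0
        have hpos0 : pvPos e0.2 = pvKeyOf e0.2 := by
          rw [pvKeyOf_eq]
          by_cases h : pvPos e0.2 = "DST"
          · exfalso
            rw [pvKeyOf_eq] at hk0
            simp [h] at hk0
          · simp [h]
        have helig : (["RB", "WR", "TE"] : List String).contains
            ((PySem.Dict.mk e0.2).getD "position" "") = true := by
          show (["RB", "WR", "TE"] : List String).contains (pvPos e0.2) = true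
          rw [hpos0]
          rcases hk0 with h | h | h <;> simp [h]
        simp only [List.map_cons, List.isEmpty_cons, hflexD, Bool.not_false, Bool.true_and]
        show (pvFlexScanA (pvRofE dp) (e0.2 :: rest.map (·.2))).items = _
        rw [pvFlexScanA]
        rw [if_pos helig]
        -- B's minimum over the overflow entries is exactly e0
        rw [hL] at hperm
        cases hov : (pvGE "RB" dp).drop 2 ++ (pvGE "WR" dp).drop 2 ++ (pvGE "TE" dp).drop 1 with
        | nil =>
            exfalso
            rw [hov] at hperm
            exact List.cons_ne_nil _ _ hperm.eq_nil
        | cons o os =>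
            rw [hov] at hperm
            obtain ⟨m, hm⟩ := Option.isSome_iff_exists.mp
              (pvMin?_isSome (o :: os) (fun x => x.1) (List.cons_ne_nil o os))
            have hmem : m ∈ (o :: os : List PVEntry) := PySem.List.min?_mem hm
            have hminle := PySem.List.min?_isMin hm e0 (hperm.mem_iff.mp (List.mem_cons_self))
            have hme0 : m = e0 := by
              rcases List.mem_cons.mp (hperm.mem_iff.mpr hmem) with h | h
              · exact h
              · exfalso
                have := (List.pairwise_cons.mp (hL ▸ hmono)).1 m h
                omega
            have hmin : PySem.List.minD (o :: os) (fun x => x.1) o = e0 := by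
              rw [PySem.List.minD, hm, Option.getD_some, hme0]
            rw [pvFlexB, hmin]
            simp only [pvRofE, pvMk_ins_FLEX]
            simp only [pvMk, pvSlotB, pvGroups_getD]
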